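-- pv_equiv track=rewrite | github.com/run-tranxmart/lidar_mmdetection3d | tools/projects/jac/dataSpliter.py | check_batch
-- ===== SOURCE A (Python) =====
-- def check_batch(batch, postfix:str):
--
--     if postfix == 'pcd':
--         if len(batch) != 6:
--             return False
--     elif postfix == 'png':
--         if len(batch) != 4:
--             return False
--
--     first_second = batch[0]['secs']
--     first_nanosecond = str(batch[0]['nanosecs'])
--
--     for b in batch:
--         b_nano = str(b['nanosecs'])
--
--         if b['secs'] != first_second:
--             return False
--         if len(b_nano) != len(first_nanosecond):
--             return False
--         else:
--             if b_nano[0] != first_nanosecond[0]: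
--                 return False
--     return True
-- ===== SOURCE B (Python) =====
-- def check_batch(batch, postfix: str):
--     if postfix == 'pcd' and len(batch) != 6:
--         return False
--     if postfix == 'png' and len(batch) != 4:
--         return False
--     sigs = {(b['secs'], len(str(b['nanosecs'])), str(b['nanosecs'])[0]) for b in batch}
--     return len(sigs) == 1
-- ===== Notes on version B (the rewrite author's own statement) =====
-- stated objective: simpler
-- what changed: Replaces the early-return reference-vs-each-element loop by collecting one (secs, len(str(nanosecs)), str(nanosecs)[0]) signature per element into a set and testing that the set has exactly one distinct member.
-- outside the precondition, e.g. on check_batch([], 'jpg'): A raises IndexError, B returns False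
-- crash fix: On an empty batch whose postfix is neither 'pcd' nor 'png', A raises IndexError at batch[0]; B returns False (zero distinct signatures). — e.g. on check_batch([], "jpg"): A raises IndexError, B returns false
import Mathlib
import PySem

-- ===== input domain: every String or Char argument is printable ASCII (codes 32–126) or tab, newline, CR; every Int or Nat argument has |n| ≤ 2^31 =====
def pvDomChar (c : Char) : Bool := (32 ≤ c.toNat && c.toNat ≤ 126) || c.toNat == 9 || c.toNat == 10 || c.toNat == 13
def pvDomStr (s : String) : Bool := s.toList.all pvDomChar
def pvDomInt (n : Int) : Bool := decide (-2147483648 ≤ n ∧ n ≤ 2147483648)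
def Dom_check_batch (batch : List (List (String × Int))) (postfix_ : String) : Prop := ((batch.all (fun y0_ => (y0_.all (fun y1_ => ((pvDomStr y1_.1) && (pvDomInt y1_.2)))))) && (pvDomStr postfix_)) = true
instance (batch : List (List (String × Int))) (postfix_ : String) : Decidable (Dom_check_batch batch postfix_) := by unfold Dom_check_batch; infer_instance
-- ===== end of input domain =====

-- B replaces A's reference-vs-each-element early-return loop by a set of per-element
-- signatures (secs, len(str(nanosecs)), first char of str(nanosecs)) tested for having
-- exactly one distinct member (objective: simpler).

-- ===== PORT A =====
-- b['secs'] / b['nanosecs']; exact under Pre_ (the key is present)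
def pvAGet (b : List (String × Int)) (k : String) : Int :=
  ((b.find? (fun p => p.1 == k)).map Prod.snd).getD 0

-- the for-loop of A with its three early returns
def pvALoop (first_second : Int) (first_nanosecond : List Char) :
    List (List (String × Int)) → Bool
  | [] => true
  | b :: rest =>
    let b_nano := PySem.Int.toChars (pvAGet b "nanosecs")
    if pvAGet b "secs" ≠ first_second then false
    else if b_nano.length ≠ first_nanosecond.length then false
    else if b_nano[0]? ≠ first_nanosecond[0]? then false
    else pvALoop first_second first_nanosecond rest

def check_batch (batch : List (List (String × Int))) (postfix_ : String) : Bool :=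
  if postfix_ == "pcd" && batch.length != 6 then false
  else if postfix_ == "png" && batch.length != 4 then false
  else
    match batch with
    | [] => false   -- Python raises IndexError at batch[0]; excluded by Pre_
    | b0 :: _ =>
      pvALoop (pvAGet b0 "secs") (PySem.Int.toChars (pvAGet b0 "nanosecs")) batch

-- ===== PORT B =====
def pvBSig (b : List (String × Int)) : Int × Nat × Option Char :=
  let n := PySem.Int.toChars (((b.find? (fun p => p.1 == "nanosecs")).map Prod.snd).getD 0)
  (((b.find? (fun p => p.1 == "secs")).map Prod.snd).getD 0, n.length, n[0]?)

def check_batch_alt (batch : List (List (String × Int))) (postfix_ : String) : Bool :=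
  if postfix_ == "pcd" && batch.length != 6 then false
  else if postfix_ == "png" && batch.length != 4 then false
  else PySem.Set.len (PySem.Set.ofList (batch.map pvBSig)) == 1

-- ===== PRECONDITION & SPEC =====
-- Pre_ admits every input on which A returns: either a length guard fires (A returns
-- False touching nothing), or the batch is nonempty (else batch[0] → IndexError) and
-- every element carries both keys (else KeyError).  It also excludes the corner where A
-- happens to return False before reaching a later key-less element; B raises KeyError there.
def Pre_check_batch (batch : List (List (String × Int))) (postfix_ : String) : Prop :=
  ((postfix_ = "pcd" ∧ batch.length ≠ 6) ∨ (postfix_ = "png" ∧ batch.length ≠ 4)) ∨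
  (batch ≠ [] ∧ ∀ b ∈ batch,
      (b.any (fun p => p.1 == "secs")) = true ∧ (b.any (fun p => p.1 == "nanosecs")) = true)
instance (batch : List (List (String × Int))) (postfix_ : String) : Decidable (Pre_check_batch batch postfix_) := by unfold Pre_check_batch; infer_instance

def pvWitness_check_batch : (List (List (String × Int))) × String :=
  ([[("secs", 1), ("nanosecs", 5)], [("secs", 1), ("nanosecs", 7)]], "jpg")

-- On an empty batch whose postfix is neither 'pcd' nor 'png', A raises IndexError at batch[0]; B returns False.
def Raises_check_batch (batch : List (List (String × Int))) (postfix_ : String) : Prop :=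
  batch = [] ∧ postfix_ ≠ "pcd" ∧ postfix_ ≠ "png"
instance (batch : List (List (String × Int))) (postfix_ : String) : Decidable (Raises_check_batch batch postfix_) := by unfold Raises_check_batch; infer_instance
def pvRaiseWitness_check_batch : (List (List (String × Int))) × String := ([], "jpg")
def pvRaiseWitnessOut_check_batch : Bool := false

def Spec_check_batch (batch : List (List (String × Int))) (postfix_ : String) (out : Bool) : Prop := out = check_batch_alt batch postfix_
instance (batch : List (List (String × Int))) (postfix_ : String) (out : Bool) : Decidable (Spec_check_batch batch postfix_ out) := by unfold Spec_check_batch; infer_instance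

-- ===== CLAIM (what is proved, stated in full; the proofs are below) =====
def Claim_equal_check_batch : Prop := ∀ (batch : List (List (String × Int))) (postfix_ : String), Dom_check_batch batch postfix_ → Pre_check_batch batch postfix_ → Spec_check_batch batch postfix_ (check_batch batch postfix_)

def Claim_raises_check_batch : Prop := (∀ (batch : List (List (String × Int))) (postfix_ : String), Dom_check_batch batch postfix_ → Raises_check_batch batch postfix_ → ¬ Pre_check_batch batch postfix_) ∧ (Dom_check_batch (pvRaiseWitness_check_batch.1) (pvRaiseWitness_check_batch.2) ∧ Raises_check_batch (pvRaiseWitness_check_batch.1) (pvRaiseWitness_check_batch.2) ∧ check_batch_alt (pvRaiseWitness_check_batch.1) (pvRaiseWitness_check_batch.2) = pvRaiseWitnessOut_check_batch)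

-- ===== LEMMAS AND PROOFS =====

-- A's loop tests exactly signature-equality against the reference signature.
theorem pvALoop_eq_all (s : Int) (n : List Char) (l : List (List (String × Int))) :
    pvALoop s n l = l.all (fun b => pvBSig b == (s, n.length, n[0]?)) := by
  induction l with
  | nil => rfl
  | cons b rest ih =>
    have hEq : pvBSig b = (pvAGet b "secs",
        (PySem.Int.toChars (pvAGet b "nanosecs")).length,
        (PySem.Int.toChars (pvAGet b "nanosecs"))[0]?) := rfl
    simp only [pvALoop, List.all_cons, hEq]
    split_ifs with h1 h2 h3
    · simp [Prod.ext_iff, h1]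
    · simp [Prod.ext_iff, h2]
    · simp [Prod.ext_iff, h3]
    · push_neg at h1 h2 h3
      simp [h1, h2, h3, ih]

theorem ofList_singleton_of_all {α : Type} [BEq α] [LawfulBEq α] (x : α)
    (xs : List α) (h : ∀ y ∈ xs, y = x) :
    PySem.Set.ofList (x :: xs) = [x] := by
  have hfold : ∀ ys : List α, (∀ y ∈ ys, y = x) → ys.foldl PySem.Set.add [x] = [x] := by
    intro ys
    induction ys with
    | nil => intro _; rfl
    | cons y ys ih =>
      intro hy
      have hyx : y = x := hy y (by simp)
      have hadd : PySem.Set.add [x] y = [x] := by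
        simp [PySem.Set.add, PySem.Set.contains, hyx]
      simp only [List.foldl_cons, hadd]
      exact ih (fun z hz => hy z (by simp [hz]))
  have h0 : PySem.Set.ofList (x :: xs) = xs.foldl PySem.Set.add [x] := by
    simp [PySem.Set.ofList_eq_foldl, PySem.Set.add, PySem.Set.contains]
  rw [h0]
  exact hfold xs h

theorem len_ofList_eq_one {α : Type} [BEq α] [LawfulBEq α] (x : α) (xs : List α) :
    (PySem.Set.len (PySem.Set.ofList (x :: xs)) == 1) = xs.all (fun y => y == x) := by
  by_cases h : ∀ y ∈ xs, y = x
  · rw [ofList_singleton_of_all x xs h]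
    simp [PySem.Set.len]
    intro y hy
    exact h y hy
  · push_neg at h
    obtain ⟨y, hy, hyx⟩ := h
    have hmx : x ∈ PySem.Set.ofList (x :: xs) := by
      rw [PySem.Set.mem_ofList]; simp
    have hmy : y ∈ PySem.Set.ofList (x :: xs) := by
      rw [PySem.Set.mem_ofList]; simp [hy]
    have hlen : PySem.Set.len (PySem.Set.ofList (x :: xs)) ≠ 1 := by
      intro hl
      have hl' : (PySem.Set.ofList (x :: xs)).length = 1 := by
        simp only [PySem.Set.len] at hl
        exact_mod_cast hl
      obtain ⟨z, hz⟩ := List.length_eq_one_iff.mp hl'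
      rw [hz] at hmx hmy
      simp at hmx hmy
      exact hyx (hmy.trans hmx.symm)
    have hall : xs.all (fun y => y == x) = false := by
      simp [List.all_eq_false]
      exact ⟨y, hy, hyx⟩
    rw [hall]
    simpa using hlen

-- ===== VERDICT (by name: the statement is the Claim_ definition above) =====
theorem check_batch_spec : Claim_equal_check_batch := by
  intro batch postfix_ _ hpre
  unfold Spec_check_batch check_batch check_batch_alt
  cases batch with
  | nil => split_ifs <;> rfl
  | cons b0 rest =>
    split_ifs with h1 h2
    · rfl
    · rfl
    · show pvALoop (pvAGet b0 "secs") (PySem.Int.toChars (pvAGet b0 "nanosecs"))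
          (b0 :: rest) = _
      rw [pvALoop_eq_all]
      have hsig : pvBSig b0 = (pvAGet b0 "secs",
          (PySem.Int.toChars (pvAGet b0 "nanosecs")).length,
          (PySem.Int.toChars (pvAGet b0 "nanosecs"))[0]?) := rfl
      rw [← hsig, List.map_cons, len_ofList_eq_one]
      simp [List.all_map]
      rfl

@[simp] theorem check_batch_raises : Claim_raises_check_batch := by
  unfold Claim_raises_check_batch
  refine ⟨?_, by decide, by decide, by decide⟩
  intro batch postfix_ _ hr hpre
  unfold Raises_check_batch at hr
  unfold Pre_check_batch at hpre
  obtain ⟨hb, hp1, hp2⟩ := hr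
  rcases hpre with (⟨hp, _⟩ | ⟨hp, _⟩) | ⟨hne, _⟩
  exacts [hp1 hp, hp2 hp, hne hb]
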